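-- pv_equiv track=rewrite | github.com/FefanAM/Some-python-stuff | prevadec_soustav.py | tens
-- ===== SOURCE A (Python) =====
-- numbers = ["0", "1", "2", "3", "4", "5", "6", "7", "8", "9"]
--
-- def convert_to_number(let):
--     let = let.upper()
--     if let in numbers:
--         return let
--     else:
--         return ord(let) - 55
--
-- def tens(z, r):
--     res = 0
--     z = str(z)
--     z = ''.join(reversed(z))
--     i = 0
--     for x in z:
--         res += int(convert_to_number(x)) * r ** i
--         i += 1
--     return res
-- ===== SOURCE B (Python) =====
-- def tens(z, r):
--     res = 0
--     for ch in str(z):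
--         u = ch.upper()
--         d = int(u) if u in "0123456789" else ord(u) - 55
--         res = res * r + d
--     return res
-- ===== Notes on version B (the rewrite author's own statement) =====
-- stated objective: faster
-- what changed: Replaces the reverse-the-string-and-sum-digit-times-r**i loop with a single left-to-right Horner pass (res = res*r + digit), eliminating the per-character exponentiation.
import Mathlib
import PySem

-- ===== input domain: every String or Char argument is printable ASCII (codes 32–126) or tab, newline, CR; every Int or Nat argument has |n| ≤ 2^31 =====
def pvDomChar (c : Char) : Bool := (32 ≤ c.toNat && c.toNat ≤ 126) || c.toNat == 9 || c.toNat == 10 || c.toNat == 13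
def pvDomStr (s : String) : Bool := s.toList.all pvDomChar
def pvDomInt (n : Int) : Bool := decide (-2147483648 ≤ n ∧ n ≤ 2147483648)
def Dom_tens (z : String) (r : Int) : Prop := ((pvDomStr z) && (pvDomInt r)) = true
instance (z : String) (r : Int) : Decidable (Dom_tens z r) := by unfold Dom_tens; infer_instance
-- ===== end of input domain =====

-- ===== PORT A =====
-- B changes: single Horner pass instead of reversing the string and summing digit * r ** i (timed faster, asymptotic).
-- convert_to_number + int(...) from Source A, on one character: upper(), digit chars give their value, else ord(upper)-55.
def convNum (c : Char) : Int :=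
  let u : Char := if 'a' ≤ c ∧ c ≤ 'z' then Char.ofNat (c.toNat - 32) else c
  if '0' ≤ u ∧ u ≤ '9' then ((u.toNat : Int) - 48) else ((u.toNat : Int) - 55)

-- the for-loop of Source A: state (res, i), over the reversed characters
def tensGo (r : Int) : List Char → Int → Nat → Int
  | [], res, _ => res
  | c :: t, res, i => tensGo r t (res + convNum c * r ^ i) (i + 1)

def tens (z : String) (r : Int) : Int := tensGo r z.toList.reverse 0 0

-- ===== PORT B =====
def tens_alt (z : String) (r : Int) : Int :=
  z.toList.foldl (fun res c =>
    let u : Char := if 'a' ≤ c ∧ c ≤ 'z' then Char.ofNat (c.toNat - 32) else c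
    let d : Int := if '0' ≤ u ∧ u ≤ '9' then ((u.toNat : Int) - 48) else ((u.toNat : Int) - 55)
    res * r + d) 0

-- ===== PRECONDITION & SPEC =====
def Spec_tens (z : String) (r : Int) (out : Int) : Prop := out = tens_alt z r
instance (z : String) (r : Int) (out : Int) : Decidable (Spec_tens z r out) := by unfold Spec_tens; infer_instance

-- ===== CLAIM (what is proved, stated in full; the proofs are below) =====
def Claim_equal_tens : Prop := ∀ (z : String) (r : Int), Dom_tens z r → Spec_tens z r (tens z r)

-- ===== LEMMAS AND PROOFS =====
theorem tensGo_eq (r : Int) : ∀ (l : List Char) (res : Int) (i : Nat),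
    tensGo r l res i
      = res + r ^ i * l.reverse.foldl (fun a c => a * r + convNum c) 0
  | [], res, i => by simp [tensGo]
  | c :: t, res, i => by
    rw [tensGo, tensGo_eq r t]
    simp only [List.reverse_cons, List.foldl_concat]
    ring

theorem tens_eq_horner (z : String) (r : Int) :
    tens z r = z.toList.foldl (fun a c => a * r + convNum c) 0 := by
  rw [tens, tensGo_eq]
  simp

-- ===== VERDICT (by name: the statement is the Claim_ definition above) =====
theorem tens_spec : Claim_equal_tens := by
  intro z r _
  unfold Spec_tens tens_alt
  rw [tens_eq_horner]
  simp only [convNum]
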